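-- pv_equiv track=rewrite | github.com/phibzy/InterviewQPractice | Solutions/TwoStrings/twoStrings.py | twoStrings
-- ===== SOURCE A (Python) =====
-- def twoStrings(s1, s2):
--     # Because a substring can be as small as a single letter, the
--     # question is really: "Do these strings share any letters?"
--
--     letters = dict()
--     for i in s1:
--         letters.setdefault(i, 1)
--
--     for i in s2:
--         if i in letters:
--             return "YES"
--
--     return "NO"
-- ===== SOURCE B (Python) =====
-- def twoStrings(s1, s2):
--     # Sort both strings and run a two-pointer merge: a shared character
--     # exists iff the merge ever sees equal heads.
--     a = sorted(s1)
--     b = sorted(s2)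
--     i = j = 0
--     while i < len(a) and j < len(b):
--         if a[i] == b[j]:
--             return "YES"
--         if a[i] < b[j]:
--             i += 1
--         else:
--             j += 1
--     return "NO"
-- ===== Notes on version B (the rewrite author's own statement) =====
-- stated objective: alternative
-- what changed: Replaces A's hash-table build plus early-return membership scan with a sort-both-then-two-pointer-merge detection of a common character.
import Mathlib
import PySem

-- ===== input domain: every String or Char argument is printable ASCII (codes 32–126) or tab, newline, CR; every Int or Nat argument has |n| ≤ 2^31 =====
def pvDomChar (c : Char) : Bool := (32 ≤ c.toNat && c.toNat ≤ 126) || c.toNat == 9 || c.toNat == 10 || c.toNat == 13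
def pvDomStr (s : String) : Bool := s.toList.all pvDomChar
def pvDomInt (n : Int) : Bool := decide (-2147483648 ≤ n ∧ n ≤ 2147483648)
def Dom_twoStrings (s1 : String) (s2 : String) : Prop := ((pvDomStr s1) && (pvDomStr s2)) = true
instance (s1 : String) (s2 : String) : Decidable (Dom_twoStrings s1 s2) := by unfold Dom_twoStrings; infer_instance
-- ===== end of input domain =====

-- B replaces A's dict-table + early-return scan with sort-both-strings and a two-pointer merge (alternative algorithm; same result).
-- ===== PORT A =====
-- the 'for i in s2: if i in letters: return "YES"' loop with early return
def twoStringsScan (letters : PySem.Dict Char Int) : List Char → String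
  | [] => "NO"
  | c :: rest => if letters.contains c then "YES" else twoStringsScan letters rest

def twoStrings (s1 : String) (s2 : String) : String :=
  let letters := s1.toList.foldl (fun d i => d.setdefault i 1) PySem.Dict.empty
  twoStringsScan letters s2.toList

-- ===== PORT B =====
-- the two-pointer while loop over the two sorted lists
def twoStringsMerge : List Char → List Char → String
  | [], _ => "NO"
  | _ :: _, [] => "NO"
  | x :: xs, y :: ys =>
      if x = y then "YES"
      else if x < y then twoStringsMerge xs (y :: ys)
      else twoStringsMerge (x :: xs) ys

def twoStrings_alt (s1 : String) (s2 : String) : String :=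
  twoStringsMerge (PySem.List.sorted s1.toList (fun c => c) false)
                  (PySem.List.sorted s2.toList (fun c => c) false)

-- ===== PRECONDITION & SPEC =====
def Spec_twoStrings (s1 : String) (s2 : String) (out : String) : Prop := out = twoStrings_alt s1 s2
instance (s1 : String) (s2 : String) (out : String) : Decidable (Spec_twoStrings s1 s2 out) := by unfold Spec_twoStrings; infer_instance

-- ===== CLAIM (what is proved, stated in full; the proofs are below) =====
def Claim_equal_twoStrings : Prop := ∀ (s1 : String) (s2 : String), Dom_twoStrings s1 s2 → Spec_twoStrings s1 s2 (twoStrings s1 s2)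

-- ===== LEMMAS AND PROOFS =====

-- ===== VERDICT (by name: the statement is the Claim_ definition above) =====
lemma contains_letters (l : List Char) (d : PySem.Dict Char Int) (c : Char) :
    (l.foldl (fun d i => d.setdefault i 1) d).contains c = (d.contains c || decide (c ∈ l)) := by
  induction l generalizing d with
  | nil => simp
  | cons x xs ih =>
      simp only [List.foldl_cons, ih, PySem.Dict.contains_setdefault, List.mem_cons]
      by_cases h : c = x
      · simp [h]
      · have hb : (c == x) = false := by simp [h]
        rw [hb]
        simp [h]

lemma scan_eq (d : PySem.Dict Char Int) (l : List Char) :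
    twoStringsScan d l = if ∃ c ∈ l, d.contains c then "YES" else "NO" := by
  induction l with
  | nil => simp [twoStringsScan]
  | cons x xs ih =>
      simp only [twoStringsScan, ih]
      by_cases h : d.contains x <;> simp [h]

lemma merge_eq (a b : List Char) :
    a.Pairwise (· ≤ ·) → b.Pairwise (· ≤ ·) →
    twoStringsMerge a b = if ∃ c ∈ a, c ∈ b then "YES" else "NO" := by
  fun_induction twoStringsMerge a b with
  | case1 b => intro _ _; simp
  | case2 x xs => intro _ _; simp
  | case3 xs y ys =>
      intro _ _
      have : ∃ c ∈ y :: xs, c ∈ y :: ys := ⟨y, List.mem_cons_self, List.mem_cons_self⟩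
      simp only [this, if_pos]
  | case4 x xs y ys hne hlt ih =>
      intro ha hb
      have ha' := (List.pairwise_cons.mp ha).2
      have hyys := List.pairwise_cons.mp hb
      rw [ih ha' hb]
      congr 1
      simp only [eq_iff_iff]
      constructor
      · rintro ⟨c, hc1, hc2⟩; exact ⟨c, List.mem_cons_of_mem _ hc1, hc2⟩
      · rintro ⟨c, hc1, hc2⟩
        rcases List.mem_cons.mp hc1 with rfl | h
        · rcases List.mem_cons.mp hc2 with rfl | h2
          · exact absurd rfl hne
          · exact absurd (hyys.1 _ h2) (not_le.mpr hlt)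
        · exact ⟨c, h, hc2⟩
  | case5 x xs y ys hne hnlt ih =>
      intro ha hb
      have hylt : y < x := lt_of_le_of_ne (not_lt.mp hnlt) (fun h => hne h.symm)
      have hb' := (List.pairwise_cons.mp hb).2
      have hxxs := List.pairwise_cons.mp ha
      rw [ih ha hb']
      congr 1
      simp only [eq_iff_iff]
      constructor
      · rintro ⟨c, hc1, hc2⟩; exact ⟨c, hc1, List.mem_cons_of_mem _ hc2⟩
      · rintro ⟨c, hc1, hc2⟩
        rcases List.mem_cons.mp hc2 with rfl | h
        · rcases List.mem_cons.mp hc1 with rfl | h1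
          · exact absurd rfl hne
          · exact absurd (hxxs.1 _ h1) (not_le.mpr hylt)
        · exact ⟨c, hc1, h⟩

theorem twoStrings_spec : Claim_equal_twoStrings := by
  intro s1 s2 _
  unfold Spec_twoStrings twoStrings twoStrings_alt
  rw [scan_eq,
      merge_eq _ _ (PySem.List.sorted_pairwise s1.toList (fun c => c))
                   (PySem.List.sorted_pairwise s2.toList (fun c => c))]
  have key : (∃ c ∈ s2.toList,
      (s1.toList.foldl (fun d i => d.setdefault i 1)
        (PySem.Dict.empty : PySem.Dict Char Int)).contains c = true) ↔
      (∃ c ∈ PySem.List.sorted s1.toList (fun c => c) false,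
        c ∈ PySem.List.sorted s2.toList (fun c => c) false) := by
    simp only [contains_letters, PySem.List.mem_sorted]
    constructor
    · rintro ⟨c, h2, h1⟩
      simp at h1
      exact ⟨c, h1, h2⟩
    · rintro ⟨c, h1, h2⟩
      exact ⟨c, h2, by simp [h1]⟩
  simp only [key]
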